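-- pv_equiv track=rewrite | github.com/kuroneko2828/pop_or_classic | utils/details.py | get_score_length
-- ===== SOURCE A (Python) =====
-- def get_score_length(score):
--     l = len(score)
--     for x in score[::-1]:
--         if x == 0:
--             l -= 1
--         else:
--             break
--     return int(l / 3)
-- ===== SOURCE B (Python) =====
-- def get_score_length(score):
--     last = 0
--     for i, x in enumerate(score):
--         if x != 0:
--             last = i + 1
--     return last // 3
-- ===== Notes on version B (the rewrite author's own statement) =====
-- stated objective: alternative
-- what changed: Replaces the reversed scan that decrements the length per trailing zero (with an early break) by a single forward enumerate pass maintaining the 1-based index of the last nonzero element, returned floor-divided by 3.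
import Mathlib
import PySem

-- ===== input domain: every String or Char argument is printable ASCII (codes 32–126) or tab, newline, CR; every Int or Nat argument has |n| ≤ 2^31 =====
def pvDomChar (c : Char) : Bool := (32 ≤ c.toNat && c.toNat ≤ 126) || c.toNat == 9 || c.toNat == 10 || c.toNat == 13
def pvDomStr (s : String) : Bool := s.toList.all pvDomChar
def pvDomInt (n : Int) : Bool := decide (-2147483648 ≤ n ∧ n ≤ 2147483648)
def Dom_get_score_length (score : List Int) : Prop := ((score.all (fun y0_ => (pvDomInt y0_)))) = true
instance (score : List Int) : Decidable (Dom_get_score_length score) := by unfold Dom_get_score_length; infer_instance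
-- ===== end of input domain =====

-- B replaces A's reversed scan (decrement length per trailing zero, early break) by one forward
-- enumerate pass tracking the 1-based index of the last nonzero element; same cost, different decomposition.


-- ===== PORT A =====
-- loop over score[::-1] with early break: decrement l per leading zero of the reversed list, stop at first nonzero
def pvDropLoop (xs : List Int) (l : Int) : Int :=
  match xs with
  | [] => l
  | x :: xs => if x = 0 then pvDropLoop xs (l - 1) else l

-- int(l / 3): l is nonnegative here, so truncating division (Lean Int `/`) is exact
def get_score_length (score : List Int) : Int :=
  pvDropLoop ((PySem.List.slice? score none none (-1)).getD []) (score.length : Int) / 3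

-- ===== PORT B =====
-- forward enumerate pass maintaining the 1-based index of the last nonzero element
def get_score_length_alt (score : List Int) : Int :=
  (PySem.List.enumerate score).foldl (fun last p => if p.2 ≠ 0 then p.1 + 1 else last) 0 / 3

-- ===== PRECONDITION & SPEC =====
def Spec_get_score_length (score : List Int) (out : Int) : Prop := out = get_score_length_alt score
instance (score : List Int) (out : Int) : Decidable (Spec_get_score_length score out) := by unfold Spec_get_score_length; infer_instance

-- ===== CLAIM (what is proved, stated in full; the proofs are below) =====
def Claim_equal_get_score_length : Prop := ∀ (score : List Int), Dom_get_score_length score → Spec_get_score_length score (get_score_length score)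

-- ===== LEMMAS AND PROOFS =====

-- ===== VERDICT (by name: the statement is the Claim_ definition above) =====
theorem pv_core (score : List Int) :
    pvDropLoop score.reverse (score.length : Int)
      = (PySem.List.enumerate score).foldl (fun last p => if p.2 ≠ 0 then p.1 + 1 else last) 0 := by
  induction score using List.reverseRecOn with
  | nil => simp [pvDropLoop, PySem.List.enumerate_nil]
  | append_singleton xs a ih =>
    rw [List.reverse_append, PySem.List.enumerate_append, List.foldl_append]
    simp only [List.reverse_singleton, List.singleton_append, List.length_append,
      List.length_singleton, pvDropLoop, PySem.List.enumerate_cons, PySem.List.enumerate_nil,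
      List.foldl_cons, List.foldl_nil]
    by_cases h : a = 0
    · simp only [h, ite_true, ne_eq, not_true_eq_false, ite_false]
      rw [show ((xs.length + 1 : Nat) : Int) - 1 = (xs.length : Int) from by push_cast; ring, ih]
    · simp [h]

theorem get_score_length_spec : Claim_equal_get_score_length := by
  intro score _
  unfold Spec_get_score_length get_score_length get_score_length_alt
  rw [show (PySem.List.slice? score none none (-1)).getD [] = score.reverse from by
        rw [PySem.List.slice?_none_none_neg_one]; rfl, pv_core]
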